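-- pv_equiv track=rewrite | github.com/gagahan/IEC_com | com_tool.py | map_str
-- ===== SOURCE A (Python) =====
-- def map_str(s):
--     mapping = [ ('\x0a', '<LF>'),
--                ('\x0d', '<CR>'),
--                ('\x06', '<ACK>'),
--                ('\x01', '<SOH>'),
--                ('\x02', '<STX>'),
--                ('\x03', '<ETX>'),
--                ('\x04', '<EOT>') ]
--     for k, v in mapping:
--         s = s.replace(v, k)
--     return s
-- ===== SOURCE B (Python) =====
-- def map_str(s):
--     table = {'<LF>': '\x0a', '<CR>': '\x0d', '<ACK>': '\x06', '<SOH>': '\x01',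
--              '<STX>': '\x02', '<ETX>': '\x03', '<EOT>': '\x04'}
--     out = []
--     i = 0
--     n = len(s)
--     while i < n:
--         for tok, ch in table.items():
--             if s.startswith(tok, i):
--                 out.append(ch)
--                 i += len(tok)
--                 break
--         else:
--             out.append(s[i])
--             i += 1
--     return ''.join(out)
-- ===== Notes on version B (the rewrite author's own statement) =====
-- stated objective: alternative
-- what changed: Seven sequential whole-string str.replace passes become one left-to-right scan over the string that tries the token table at each position and emits the output in a single pass.
import Mathlib
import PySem

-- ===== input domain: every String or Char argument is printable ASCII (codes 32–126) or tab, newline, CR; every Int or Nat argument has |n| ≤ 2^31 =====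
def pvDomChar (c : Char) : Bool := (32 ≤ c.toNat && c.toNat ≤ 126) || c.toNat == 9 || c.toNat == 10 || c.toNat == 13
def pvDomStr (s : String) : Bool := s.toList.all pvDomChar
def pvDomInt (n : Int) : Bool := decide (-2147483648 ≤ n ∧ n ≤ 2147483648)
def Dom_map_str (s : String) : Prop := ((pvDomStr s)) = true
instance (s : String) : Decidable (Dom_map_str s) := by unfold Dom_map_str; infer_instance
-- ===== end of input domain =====

-- B replaces A's seven sequential str.replace passes with one left-to-right table-driven
-- scan (alternative decomposition, same result); return value only, no mutation involved.

-- ===== PORT A =====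
-- A's mapping list, in A's order: (replacement control char, token)
def pvMapping : List (Char × String) :=
  [('\x0A', "<LF>"), ('\x0D', "<CR>"), ('\x06', "<ACK>"), ('\x01', "<SOH>"),
   ('\x02', "<STX>"), ('\x03', "<ETX>"), ('\x04', "<EOT>")]

-- for k, v in mapping: s = s.replace(v, k); return s
def map_str (s : String) : String :=
  pvMapping.foldl (fun s kv => PySem.Str.replace s kv.2 (String.ofList [kv.1])) s

-- ===== PORT B =====
-- B's token table, dict insertion order = A's order: (token, control char)
def pvTable : List (List Char × Char) :=
  [("<LF>".toList, '\x0A'), ("<CR>".toList, '\x0D'), ("<ACK>".toList, '\x06'),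
   ("<SOH>".toList, '\x01'), ("<STX>".toList, '\x02'), ("<ETX>".toList, '\x03'),
   ("<EOT>".toList, '\x04')]

-- first table entry whose token is a prefix of l (Source B's `for tok, ch in table.items(): if s.startswith(tok, i)`)
def pvTokAt (T : List (List Char × Char)) (l : List Char) : Option (List Char × Char) :=
  T.find? (fun p => p.1.isPrefixOf l)

-- Source B's while loop: at each position, emit the table char and skip the token, else copy the char
def pvScan (T : List (List Char × Char)) : List Char → List Char
  | [] => []
  | c :: r =>
    match pvTokAt T (c :: r) with
    | some (tok, ch) => ch :: pvScan T (r.drop (tok.length - 1))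
    | none => c :: pvScan T r
  termination_by l => l.length
  decreasing_by all_goals simp [List.length_drop]

def map_str_alt (s : String) : String := String.ofList (pvScan pvTable s.toList)

-- ===== PRECONDITION & SPEC =====
def Spec_map_str (s : String) (out : String) : Prop := out = map_str_alt s
instance (s : String) (out : String) : Decidable (Spec_map_str s out) := by unfold Spec_map_str; infer_instance

-- ===== CLAIM (what is proved, stated in full; the proofs are below) =====
def Claim_equal_map_str : Prop := ∀ (s : String), Dom_map_str s → Spec_map_str s (map_str s)

-- ===== LEMMAS AND PROOFS =====

-- a well-formed token entry: token nonempty, starts with '<', its tail is printable (≥ 32) and '<'-free,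
-- and its replacement char is a control char (< 32)
abbrev pvGoodTok (p : List Char × Char) : Prop :=
  p.1 ≠ [] ∧ p.1.head? = some '<' ∧ (∀ c ∈ p.1.tail, c ≠ '<' ∧ 32 ≤ c.toNat) ∧ p.2.toNat < 32

theorem pvScan_nil (T : List (List Char × Char)) : pvScan T [] = [] := by
  rw [pvScan]

theorem pvScan_cons_some {T : List (List Char × Char)} {c : Char} {r tok : List Char} {ch : Char}
    (h : pvTokAt T (c :: r) = some (tok, ch)) :
    pvScan T (c :: r) = ch :: pvScan T (r.drop (tok.length - 1)) := by
  rw [pvScan, h]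

theorem pvScan_cons_none {T : List (List Char × Char)} {c : Char} {r : List Char}
    (h : pvTokAt T (c :: r) = none) :
    pvScan T (c :: r) = c :: pvScan T r := by
  rw [pvScan, h]

-- no-create: a printable prefix of the scan output was already a prefix of the input
theorem pvScan_prefix_printable (T : List (List Char × Char))
    (hT : ∀ p ∈ T, pvGoodTok p) :
    ∀ l u, (∀ c ∈ u, 32 ≤ c.toNat) → u <+: pvScan T l → u <+: l := by
  intro l
  induction l using pvScan.induct T with
  | case1 => intro u _ h; rw [pvScan_nil] at h; simpa using h
  | case2 c r tok ch hfind ih =>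
      intro u hu h
      rw [pvScan_cons_some hfind] at h
      match u, h with
      | [], _ => exact List.nil_prefix
      | u0 :: u', h =>
          exfalso
          have h0 : u0 = ch := (List.cons_prefix_cons.mp h).1
          obtain ⟨-, -, -, hctl⟩ := hT _ (List.mem_of_find?_eq_some hfind)
          have hctl' : ch.toNat < 32 := hctl
          have h32 := hu u0 (by simp)
          rw [h0] at h32
          omega
  | case3 c r hfind ih =>
      intro u hu h
      rw [pvScan_cons_none hfind] at h
      match u, h with
      | [], _ => exact List.nil_prefix
      | u0 :: u', h =>
          obtain ⟨h0, h'⟩ := List.cons_prefix_cons.mp h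
          exact List.cons_prefix_cons.mpr
            ⟨h0, ih u' (fun c hc => hu c (by simp [hc])) h'⟩

-- transparent segment: a '<'-free prefix of the input is copied verbatim by the scan
theorem pvScan_copy (T : List (List Char × Char))
    (hT : ∀ p ∈ T, pvGoodTok p) :
    ∀ u l, (∀ c ∈ u, c ≠ '<') → u <+: l → pvScan T l = u ++ pvScan T (l.drop u.length) := by
  intro u
  induction u with
  | nil => intro l _ _; simp
  | cons c u' ih =>
      intro l hu hpre
      obtain ⟨t, rfl⟩ := hpre
      have hnil : pvTokAt T (c :: (u' ++ t)) = none := by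
        apply List.find?_eq_none.mpr
        intro p hp
        obtain ⟨hne, hhd, -, -⟩ := hT p hp
        cases hp1 : p.1 with
        | nil => simp [hp1] at hne
        | cons d ds =>
            rw [hp1] at hhd
            simp only [List.head?_cons, Option.some.injEq] at hhd
            subst hhd
            have hc : c ≠ '<' := hu c (by simp)
            simp only [Bool.not_eq_true]
            rw [Bool.eq_false_iff]
            intro hcontra
            exact hc ((List.cons_prefix_cons.mp (List.isPrefixOf_iff_prefix.mp hcontra)).1).symm
      rw [List.cons_append, pvScan_cons_none hnil]
      have := ih (u' ++ t) (fun d hd => hu d (by simp [hd])) (List.prefix_append u' t)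
      rw [this]
      simp

theorem pvTokAt_append_left {T : List (List Char × Char)} {p q} {l : List Char}
    (h : pvTokAt T l = some p) : pvTokAt (T ++ [q]) l = some p := by
  simp only [pvTokAt, List.find?_append]
  simp only [pvTokAt] at h
  rw [h]
  rfl

-- main composition lemma: the single-token scan for the appended token, run on the
-- output of the scan for T, equals the scan for T ++ [t]
theorem pvScan_compose (T : List (List Char × Char)) (t : List Char) (ch : Char)
    (hT : ∀ p ∈ T, pvGoodTok p) (ht : pvGoodTok (t, ch)) :
    ∀ l, pvScan [(t, ch)] (pvScan T l) = pvScan (T ++ [(t, ch)]) l := by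
  have hT' : ∀ p ∈ T ++ [(t, ch)], pvGoodTok p := by
    intro p hp
    rcases List.mem_append.mp hp with h | h
    · exact hT p h
    · simp only [List.mem_singleton] at h; subst h; exact ht
  intro l
  induction l using pvScan.induct (T ++ [(t, ch)]) with
  | case1 => rw [pvScan_nil, pvScan_nil, pvScan_nil]
  | case2 c r tok ch' hfind ih =>
      rcases hfa : pvTokAt T (c :: r) with _ | ⟨tok0, ch0⟩
      · -- no T-token matches; the appended token is the one that fired
        have hEither : pvTokAt (T ++ [(t, ch)]) (c :: r) =
            if t.isPrefixOf (c :: r) then some (t, ch) else none := by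
          simp only [pvTokAt, List.find?_append]
          simp only [pvTokAt] at hfa
          rw [hfa]
          by_cases h : t.isPrefixOf (c :: r) <;> simp [h]
        rw [hfind] at hEither
        by_cases hpre : t.isPrefixOf (c :: r)
        · rw [if_pos hpre] at hEither
          simp only [Option.some.injEq, Prod.mk.injEq] at hEither
          obtain ⟨rfl, rfl⟩ := hEither
          obtain ⟨hne, hhd, htail, hctl⟩ := ht
          cases tok with
          | nil => simp at hne
          | cons d t' =>
            simp only [List.head?_cons, Option.some.injEq] at hhd
            subst hhd
            obtain ⟨hc, hpre'⟩ := List.cons_prefix_cons.mp (List.isPrefixOf_iff_prefix.mp hpre)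
            subst hc
            simp only [List.tail_cons] at htail
            -- scan T copies '<' then t' verbatim
            have hstep : pvScan T ('<' :: r) = '<' :: (t' ++ pvScan T (r.drop t'.length)) := by
              rw [pvScan_cons_none hfa]
              rw [pvScan_copy T hT t' r (fun d hd => (htail d hd).1) hpre']
            rw [hstep]
            -- the single-token scan fires at the front
            have hfront : pvTokAt [('<' :: t', ch')] ('<' :: (t' ++ pvScan T (r.drop t'.length))) =
                some ('<' :: t', ch') := by
              simp [pvTokAt, List.isPrefixOf_iff_prefix]
            rw [pvScan_cons_some hfront]
            rw [pvScan_cons_some hfind]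
            simp only [List.length_cons, Nat.add_sub_cancel]
            rw [List.drop_left]
            simp only [List.length_cons, Nat.add_sub_cancel] at ih
            exact congrArg (ch' :: ·) ih
        · rw [if_neg hpre] at hEither; exact absurd hEither (by simp)
      · -- a T-token fired: it is also the first match in T ++ [t]
        have hx := pvTokAt_append_left (q := (t, ch)) hfa
        rw [hfind] at hx
        simp only [Option.some.injEq, Prod.mk.injEq] at hx
        obtain ⟨rfl, rfl⟩ := hx
        obtain ⟨hne, hhd, htail, hctl⟩ := hT' _ (List.mem_of_find?_eq_some hfind)
        have hctl' : ch'.toNat < 32 := hctl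
        rw [pvScan_cons_some hfa, pvScan_cons_some hfind]
        -- t cannot match at the emitted control char
        have hnm : pvTokAt [(t, ch)] (ch' :: pvScan T (r.drop (tok.length - 1))) = none := by
          obtain ⟨hne', hhd', -, -⟩ := ht
          cases ht' : t with
          | nil => rw [ht'] at hne'; simp at hne'
          | cons d t' =>
            rw [ht'] at hhd'; simp only [List.head?_cons, Option.some.injEq] at hhd'
            subst hhd'
            simp only [pvTokAt, List.find?_cons]
            have hnp : ('<' :: t').isPrefixOf (ch' :: pvScan T (r.drop (tok.length - 1))) = false := by
              rw [Bool.eq_false_iff]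
              intro hcontra
              have h1 := (List.cons_prefix_cons.mp (List.isPrefixOf_iff_prefix.mp hcontra)).1
              have h2 : ('<').toNat = ch'.toNat := by rw [h1]
              have h3 : ('<').toNat = 60 := by decide
              omega
            simp [hnp]
        rw [pvScan_cons_none hnm]
        exact congrArg (ch' :: ·) ih
  | case3 c r hfind ih =>
      -- nothing fires in T ++ [t]
      have hsplit : pvTokAt T (c :: r) = none ∧ t.isPrefixOf (c :: r) = false := by
        simp only [pvTokAt, List.find?_eq_none] at hfind ⊢
        constructor
        · intro p hp; exact hfind p (List.mem_append_left _ hp)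
        · rw [Bool.eq_false_iff]
          intro h
          exact hfind (t, ch) (List.mem_append_right _ (by simp)) h
      obtain ⟨hfa, hnt⟩ := hsplit
      rw [pvScan_cons_none hfa, pvScan_cons_none hfind]
      -- t cannot fire at c :: pvScan T r either: its printable tail would already prefix r
      have hnm : pvTokAt [(t, ch)] (c :: pvScan T r) = none := by
        obtain ⟨hne', hhd', htail', -⟩ := ht
        cases ht' : t with
        | nil => rw [ht'] at hne'; simp at hne'
        | cons d t' =>
          rw [ht'] at hhd'; simp only [List.head?_cons, Option.some.injEq] at hhd'
          subst hhd'
          rw [ht'] at htail'; simp only [List.tail_cons] at htail'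
          simp only [pvTokAt, List.find?_cons]
          have hnp : ('<' :: t').isPrefixOf (c :: pvScan T r) = false := by
            rw [Bool.eq_false_iff]
            intro hcontra
            obtain ⟨h1, h2⟩ := List.cons_prefix_cons.mp (List.isPrefixOf_iff_prefix.mp hcontra)
            have h3 : t' <+: r :=
              pvScan_prefix_printable T hT r t' (fun d hd => (htail' d hd).2) h2
            rw [ht'] at hnt
            rw [Bool.eq_false_iff] at hnt
            exact hnt (List.isPrefixOf_iff_prefix.mpr (List.cons_prefix_cons.mpr ⟨h1, h3⟩))
          simp [hnp]
      rw [pvScan_cons_none hnm]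
      exact congrArg (c :: ·) ih

-- scan with the empty table is the identity
theorem pvScan_empty : ∀ l, pvScan ([] : List (List Char × Char)) l = l
  | [] => pvScan_nil []
  | c :: r => by
      rw [pvScan_cons_none (by simp [pvTokAt])]
      exact congrArg (c :: ·) (pvScan_empty r)

-- PySem's replace loop, with enough fuel, is the single-token scan
theorem pvGo_eq (old : List Char) (ch : Char) (hold : old ≠ []) :
    ∀ fuel l acc, l.length ≤ fuel →
      PySem.Chars.replace.go old [ch] fuel l acc = acc.reverse ++ pvScan [(old, ch)] l := by
  intro fuel
  induction fuel with
  | zero =>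
      intro l acc hl
      have hln : l = [] := List.eq_nil_of_length_eq_zero (Nat.le_zero.mp hl)
      subst hln
      rw [PySem.Chars.replace.go, pvScan_nil]
  | succ n ihn =>
      intro l acc hl
      cases l with
      | nil =>
          rw [PySem.Chars.replace.go, pvScan_nil]
          · simp
          · simp
      | cons c tl =>
          obtain ⟨d, old', rfl⟩ : ∃ d old', old = d :: old' := by
            cases old with
            | nil => exact absurd rfl hold
            | cons d o' => exact ⟨d, o', rfl⟩
          by_cases hp : (d :: old').isPrefixOf (c :: tl) = true
          · rw [PySem.Chars.replace.go]
            simp only [hp, if_true]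
            have hdrop : List.drop (d :: old').length (c :: tl) = tl.drop ((d :: old').length - 1) := by
              simp
            rw [hdrop]
            have hlen : (tl.drop ((d :: old').length - 1)).length ≤ n := by
              simp only [List.length_cons] at hl
              simp only [List.length_drop]
              omega
            rw [ihn _ _ hlen]
            have hfa : pvTokAt [(d :: old', ch)] (c :: tl) = some (d :: old', ch) := by
              simp [pvTokAt, hp]
            rw [pvScan_cons_some hfa]
            simp
          · rw [PySem.Chars.replace.go]
            simp only [hp]
            have hlen : tl.length ≤ n := by
              simp only [List.length_cons] at hl; omega
            rw [ihn _ _ hlen]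
            have hfa : pvTokAt [(d :: old', ch)] (c :: tl) = none := by
              simp only [pvTokAt, List.find?_cons]
              simp [hp]
            rw [pvScan_cons_none hfa]
            simp
  
-- PySem.Chars.replace by a nonempty token with a one-char replacement = single-token scan
theorem pvReplace_eq (old : List Char) (ch : Char) (hold : old ≠ []) (l : List Char) :
    PySem.Chars.replace l old [ch] = pvScan [(old, ch)] l := by
  rw [PySem.Chars.replace]
  rw [if_neg (by simpa [List.isEmpty_iff] using hold)]
  simpa using pvGo_eq old ch hold l.length l [] le_rfl

-- one chain step: replacing token t in the T-scanned string extends the table by t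
theorem pvStep (T : List (List Char × Char)) (t : List Char) (ch : Char) (cs x : List Char)
    (hT : ∀ p ∈ T, pvGoodTok p) (ht : pvGoodTok (t, ch)) (hold : t ≠ [])
    (hx : x = pvScan T cs) :
    PySem.Chars.replace x t [ch] = pvScan (T ++ [(t, ch)]) cs := by
  rw [hx, pvReplace_eq t ch hold, pvScan_compose T t ch hT ht]

-- ===== VERDICT (by name: the statement is the Claim_ definition above) =====
set_option maxHeartbeats 1000000 in
set_option maxRecDepth 8192 in
theorem map_str_spec : Claim_equal_map_str := by
  intro s _
  unfold Spec_map_str map_str map_str_alt pvMapping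
  simp only [List.foldl_cons, List.foldl_nil, PySem.Str.replace, String.toList_ofList]
  congr 1
  have e0 : pvScan ([] : List (List Char × Char)) s.toList = s.toList := pvScan_empty s.toList
  have e1 := pvStep [] "<LF>".toList '\x0A' s.toList s.toList (by simp) (by simp [pvGoodTok]) (by decide) e0.symm
  have e2 := pvStep _ "<CR>".toList '\x0D' s.toList _ (by simp [pvGoodTok]) (by simp [pvGoodTok]) (by decide) e1
  have e3 := pvStep _ "<ACK>".toList '\x06' s.toList _ (by simp [pvGoodTok]) (by simp [pvGoodTok]) (by decide) e2
  have e4 := pvStep _ "<SOH>".toList '\x01' s.toList _ (by simp [pvGoodTok]) (by simp [pvGoodTok]) (by decide) e3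
  have e5 := pvStep _ "<STX>".toList '\x02' s.toList _ (by simp [pvGoodTok]) (by simp [pvGoodTok]) (by decide) e4
  have e6 := pvStep _ "<ETX>".toList '\x03' s.toList _ (by simp [pvGoodTok]) (by simp [pvGoodTok]) (by decide) e5
  have e7 := pvStep _ "<EOT>".toList '\x04' s.toList _ (by simp [pvGoodTok]) (by simp [pvGoodTok]) (by decide) e6
  rw [e7]
  congr 1
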